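-- pv_equiv track=rewrite | github.com/carlzimmerman/zimmerman-formula | research/proof_attempt/meta_mathematical_attack.py | count_sieves
-- ===== SOURCE A (Python) =====
-- def count_sieves(n):
--     """Count sieves on n (divisor-closed subsets of divisors)."""
--     divisors = [d for d in range(1, n+1) if n % d == 0]
--
--     # A sieve is a downward-closed subset
--     sieves = []
--     for i in range(2**len(divisors)):
--         subset = [divisors[j] for j in range(len(divisors)) if (i >> j) & 1]
--         # Check downward closure
--         is_sieve = True
--         for d in subset:
--             for d_prime in range(1, d):
--                 if d % d_prime == 0 and d_prime not in subset:
--                     is_sieve = False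
--                     break
--             if not is_sieve:
--                 break
--         if is_sieve:
--             sieves.append(subset)
--     return sieves
-- ===== SOURCE B (Python) =====
-- def count_sieves(n):
--     """Count sieves on n (divisor-closed subsets of divisors)."""
--     divisors = [d for d in range(1, n + 1) if n % d == 0]
--     # Order ideals of the divisibility poset, enumerated output-sensitively.
--     # `ideals` holds the bitmasks of all downward-closed subsets of the first
--     # j divisors, in increasing mask order (which is exactly A's output order).
--     ideals = [0]
--     for j, d in enumerate(divisors):
--         req = 0
--         for k in range(j):
--             if d % divisors[k] == 0:
--                 req |= 1 << k
--         ideals += [m | (1 << j) for m in ideals if m & req == req]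
--     return [[divisors[j] for j in range(len(divisors)) if (m >> j) & 1]
--             for m in ideals]
-- ===== Notes on version B (the rewrite author's own statement) =====
-- stated objective: faster
-- what changed: Instead of testing every subset of the divisor list for downward closure with a nested divisor scan, B grows the list of downward-closed subsets incrementally (each new divisor extends exactly the already-valid subsets whose bitmask contains its precomputed proper-divisor mask), producing the same masks in the same increasing order, so the work is proportional to the number of sieves rather than to the full power set.
import Mathlib
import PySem

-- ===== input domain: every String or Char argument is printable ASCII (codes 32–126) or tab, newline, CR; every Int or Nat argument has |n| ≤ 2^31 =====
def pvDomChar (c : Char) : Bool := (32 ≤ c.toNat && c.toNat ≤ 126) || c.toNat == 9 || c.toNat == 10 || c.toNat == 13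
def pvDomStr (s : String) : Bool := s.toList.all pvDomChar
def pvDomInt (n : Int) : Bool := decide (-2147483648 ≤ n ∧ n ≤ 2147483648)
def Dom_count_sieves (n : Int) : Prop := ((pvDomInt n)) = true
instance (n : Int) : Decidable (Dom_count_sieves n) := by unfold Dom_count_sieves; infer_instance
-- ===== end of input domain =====

-- B replaces A's scan of all 2^d subsets of the divisors by an incremental
-- enumeration that only ever extends already-valid divisor-closed subsets (objective: faster).

-- Sub-expressions both Python versions contain verbatim:
-- [d for d in range(1, n+1) if n % d == 0]
def pvDivisors (n : Int) : List Int :=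
  (PySem.List.pyRange 1 (n + 1) 1).filter (fun d => PySem.Int.mod n d == 0)

-- [divisors[j] for j in range(len(divisors)) if (m >> j) & 1]
def pvBuild (D : List Int) (m : Int) : List Int :=
  ((PySem.List.pyRange 0 (PySem.List.len D) 1).filter
      (fun j => !(PySem.Int.band (m >>> j.toNat) 1 == 0))).map
    (fun j => PySem.List.pyGetD D j 0)

-- ===== PORT A =====
-- the downward-closure check of A's inner double loop (the breaks only short-circuit)
def pvSieve (subset : List Int) : Bool :=
  subset.all (fun d =>
    (PySem.List.pyRange 1 d 1).all (fun d' =>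
      !(PySem.Int.mod d d' == 0 && !(subset.contains d'))))

def count_sieves (n : Int) : List (List Int) :=
  let divisors := pvDivisors n
  (PySem.List.pyRange 0 ((2 : Int) ^ divisors.length) 1).foldl
    (fun sieves i =>
      let subset := pvBuild divisors i
      let is_sieve := pvSieve subset
      if is_sieve then sieves ++ [subset] else sieves)
    []

-- ===== PORT B =====
-- req = bitmask of the proper divisors of d inside divisors (Source B's inner loop)
def pvReq (D : List Int) (d : Int) (j : Nat) : Int :=
  (PySem.List.pyRange 0 (j : Int) 1).foldl
    (fun req k =>
      if PySem.Int.mod d (PySem.List.pyGetD D k 0) == 0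
      then PySem.Int.bor req ((1 : Int) <<< k.toNat) else req)
    0

def count_sieves_alt (n : Int) : List (List Int) :=
  let divisors := pvDivisors n
  let ideals := divisors.zipIdx.foldl
    (fun ideals dj =>
      let req := pvReq divisors dj.1 dj.2
      ideals ++ (ideals.filter (fun m => PySem.Int.band m req == req)).map
        (fun m => PySem.Int.bor m ((1 : Int) <<< dj.2)))
    [0]
  ideals.map (fun m => pvBuild divisors m)

-- ===== PRECONDITION & SPEC =====
def Spec_count_sieves (n : Int) (out : List (List Int)) : Prop := out = count_sieves_alt n
instance (n : Int) (out : List (List Int)) : Decidable (Spec_count_sieves n out) := by unfold Spec_count_sieves; infer_instance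

-- ===== CLAIM (what is proved, stated in full; the proofs are below) =====
def Claim_equal_count_sieves : Prop := ∀ (n : Int), Dom_count_sieves n → Spec_count_sieves n (count_sieves n)

-- ===== LEMMAS AND PROOFS =====

lemma pv_bool_eq_of_iff {a b : Bool} (h : a = true ↔ b = true) : a = b := by
  cases a <;> cases b <;> simp_all

lemma mem_pvDivisors {n x : Int} : x ∈ pvDivisors n ↔ 1 ≤ x ∧ x ≤ n ∧ x ∣ n := by
  simp [pvDivisors, PySem.List.mem_pyRange_one, PySem.Int.mod_eq_zero_iff_dvd]
  tauto

lemma pairwise_pvDivisors (n : Int) : (pvDivisors n).Pairwise (· < ·) :=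
  (PySem.List.pairwise_lt_pyRange_one 1 (n + 1)).filter _

lemma pv_shiftLeft_one (j : Nat) : ((1 : Int) <<< j) = ((2 ^ j : Nat) : Int) := by
  rw [Int.shiftLeft_eq]; push_cast; ring

lemma pv_bit (a j : Nat) : (!(PySem.Int.band ((a : Int) >>> ((j : Nat) : Int)) 1 == 0)) = a.testBit j := by
  rw [Int.shiftRight_natCast, show (1 : Int) = ((1 : Nat) : Int) from rfl, PySem.Int.band_natCast]
  simp [Nat.testBit, bne, Nat.and_comm]
  rw [show ((a : Int) >>> j) = ((a >>> j : Nat) : Int) from rfl]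
  omega

lemma pv_build_natCast (D : List Int) (a : Nat) :
    pvBuild D (a : Int) =
      ((List.range D.length).filter (fun j => a.testBit j)).map (fun j => D.getD j 0) := by
  simp only [pvBuild, PySem.List.len_eq, PySem.List.pyRange_zero_natCast, List.filter_map,
    List.map_map, Function.comp_def, Int.toNat_natCast, PySem.List.pyGetD_natCast]
  simp only [pv_bit]

lemma pv_mem_build {D : List Int} {a : Nat} {x : Int} :
    x ∈ pvBuild D (a : Int) ↔ ∃ j, j < D.length ∧ a.testBit j = true ∧ D.getD j 0 = x := by
  rw [pv_build_natCast]
  simp [List.mem_map, List.mem_filter, List.mem_range]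
  tauto

-- Nat model of pvReq
def pvNatReq (D : List Int) (d : Int) : Nat → Nat
  | 0 => 0
  | k + 1 => if D.getD k 0 ∣ d then pvNatReq D d k ||| (1 <<< k) else pvNatReq D d k

lemma pvReq_eq (D : List Int) (d : Int) (j : Nat) :
    pvReq D d j = ((pvNatReq D d j : Nat) : Int) := by
  induction j with
  | zero => rfl
  | succ k ih =>
    unfold pvReq at *
    rw [show ((k + 1 : Nat) : Int) = (k : Int) + 1 by push_cast; ring,
        PySem.List.pyRange_one_succ_right (by positivity), List.foldl_append, ih]
    simp only [List.foldl_cons, List.foldl_nil, PySem.List.pyGetD_natCast, Int.toNat_natCast,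
      beq_iff_eq, PySem.Int.mod_eq_zero_iff_dvd, pvNatReq]
    by_cases h : D.getD k 0 ∣ d
    · rw [if_pos h, if_pos h, pv_shiftLeft_one, PySem.Int.bor_natCast, Nat.one_shiftLeft]
    · rw [if_neg h, if_neg h]

lemma pvNatReq_testBit (D : List Int) (d : Int) (j k : Nat) :
    (pvNatReq D d j).testBit k = (decide (k < j) && decide (D.getD k 0 ∣ d)) := by
  induction j with
  | zero => simp [pvNatReq]
  | succ t ih =>
    rw [pvNatReq]
    by_cases h : D.getD t 0 ∣ d
    · rw [if_pos h, Nat.testBit_or, ih, Nat.one_shiftLeft]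
      rcases Nat.lt_trichotomy k t with hk | rfl | hk
      · rw [Nat.testBit_two_pow_of_ne (by omega : t ≠ k)]
        simp [hk, Nat.lt_succ_of_lt hk]
      · rw [Nat.testBit_two_pow_self]
        simp
        exact h
      · rw [Nat.testBit_two_pow_of_ne (by omega : t ≠ k)]
        have h1 : ¬ k < t := by omega
        have h2 : ¬ k ≤ t := by omega
        simp [h1, h2]
    · rw [if_neg h, ih]
      rcases Nat.lt_trichotomy k t with hk | rfl | hk
      · simp [hk, Nat.lt_succ_of_lt hk]
      · simp
        exact h
      · have h1 : ¬ k < t := by omega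
        have h2 : ¬ k ≤ t := by omega
        simp [h1, h2]

lemma pv_and_eq_right {m r : Nat} : m &&& r = r ↔ ∀ i, r.testBit i = true → m.testBit i = true := by
  constructor
  · intro h i hi
    have := congrArg (fun x => Nat.testBit x i) h
    simp only [Nat.testBit_and, hi, Bool.and_true] at this
    exact this
  · intro h
    apply Nat.eq_of_testBit_eq
    intro i
    rw [Nat.testBit_and]
    cases hr : r.testBit i
    · simp
    · simp [h i hr]

lemma pv_band_req (D : List Int) (d : Int) (j : Nat) (m : Nat) :
    (PySem.Int.band (m : Int) (pvReq D d j) == pvReq D d j)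
      = (List.range j).all (fun k => !(decide (D.getD k 0 ∣ d)) || m.testBit k) := by
  rw [pvReq_eq, PySem.Int.band_natCast]
  apply pv_bool_eq_of_iff
  rw [beq_iff_eq, Nat.cast_inj, pv_and_eq_right]
  simp only [pvNatReq_testBit, List.all_eq_true, List.mem_range, Bool.or_eq_true,
    Bool.not_eq_true', decide_eq_false_iff_not, Bool.and_eq_true, decide_eq_true_eq]
  constructor
  · intro h k hk
    by_cases hd : D.getD k 0 ∣ d
    · exact Or.inr (h k ⟨hk, hd⟩)
    · exact Or.inl hd
  · rintro h i ⟨hi, hd⟩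
    rcases h i hi with h' | h'
    · exact absurd hd h'
    · exact h'

-- "mask a is downward closed on the first j divisor positions", as a Bool
def pvGoodB (D : List Int) (j : Nat) (a : Nat) : Bool :=
  (List.range j).all (fun t =>
    !(a.testBit t) || (List.range t).all (fun k =>
      !(decide (D.getD k 0 ∣ D.getD t 0)) || a.testBit k))

lemma pv_all_congr_mem {α : Type} {l : List α} {p q : α → Bool}
    (h : ∀ a ∈ l, p a = q a) : l.all p = l.all q := by
  induction l with
  | nil => rfl
  | cons x xs ih =>
    rw [List.all_cons, List.all_cons, h x (by simp), ih (fun a ha => h a (by simp [ha]))]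

lemma pvGoodB_low (D : List Int) (j : Nat) {a : Nat} (ha : a < 2 ^ j) :
    pvGoodB D (j + 1) a = pvGoodB D j a := by
  simp [pvGoodB, List.range_succ, Nat.testBit_lt_two_pow ha]

lemma pvGoodB_high (D : List Int) (j : Nat) {m : Nat} (hm : m < 2 ^ j) :
    pvGoodB D (j + 1) (2 ^ j + m)
      = (pvGoodB D j m && (List.range j).all
          (fun k => !(decide (D.getD k 0 ∣ D.getD j 0)) || m.testBit k)) := by
  have hbit : ∀ k, k < j → (2 ^ j + m).testBit k = m.testBit k :=
    fun k hk => Nat.testBit_two_pow_add_gt hk m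
  unfold pvGoodB
  rw [List.range_succ, List.all_append, List.all_cons, List.all_nil, Bool.and_true,
    Nat.testBit_two_pow_add_eq, Nat.testBit_lt_two_pow hm]
  have h1 : (List.range j).all (fun t =>
        !((2 ^ j + m).testBit t) || (List.range t).all (fun k =>
          !(decide (D.getD k 0 ∣ D.getD t 0)) || (2 ^ j + m).testBit k))
      = (List.range j).all (fun t =>
        !(m.testBit t) || (List.range t).all (fun k =>
          !(decide (D.getD k 0 ∣ D.getD t 0)) || m.testBit k)) := by
    apply pv_all_congr_mem
    intro t ht
    rw [List.mem_range] at ht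
    rw [hbit t ht]
    congr 1
    apply pv_all_congr_mem
    intro k hk
    rw [List.mem_range] at hk
    rw [hbit k (by omega)]
  rw [h1]
  have h2 : (List.range j).all (fun k =>
        !(decide (D.getD k 0 ∣ D.getD j 0)) || (2 ^ j + m).testBit k)
      = (List.range j).all (fun k =>
        !(decide (D.getD k 0 ∣ D.getD j 0)) || m.testBit k) := by
    apply pv_all_congr_mem
    intro k hk
    rw [List.mem_range] at hk
    rw [hbit k hk]
  rw [h2]
  simp

lemma pv_or_low {m j : Nat} (hm : m < 2 ^ j) : m ||| 2 ^ j = 2 ^ j + m := by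
  apply Nat.eq_of_testBit_eq
  intro i
  rcases lt_trichotomy i j with hi | rfl | hi
  · rw [Nat.testBit_two_pow_add_gt hi, Nat.testBit_or,
      Nat.testBit_two_pow_of_ne (by omega : j ≠ i), Bool.or_false]
  · rw [Nat.testBit_two_pow_add_eq, Nat.testBit_or, Nat.testBit_two_pow_self,
      Nat.testBit_lt_two_pow hm, Bool.false_or]
    rfl
  · rw [Nat.testBit_or, Nat.testBit_two_pow_of_ne (by omega : j ≠ i),
      Nat.testBit_lt_two_pow (by calc m < 2 ^ j := hm
                                   _ ≤ 2 ^ i := Nat.pow_le_pow_right (by omega) (by omega)),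
      Bool.or_false]
    have : 2 ^ j + m < 2 ^ i := by
      have h1 : 2 ^ (j + 1) ≤ 2 ^ i := Nat.pow_le_pow_right (by omega) (by omega)
      have : 2 ^ (j + 1) = 2 ^ j + 2 ^ j := by rw [pow_succ]; omega
      omega
    rw [Nat.testBit_lt_two_pow this]

lemma pv_ideals_eq (D : List Int) (j : Nat) (hj : j ≤ D.length) :
    ((D.zipIdx.take j).foldl
      (fun ideals dj =>
        let req := pvReq D dj.1 dj.2
        ideals ++ (ideals.filter (fun m => PySem.Int.band m req == req)).map
          (fun m => PySem.Int.bor m ((1 : Int) <<< dj.2)))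
      [0])
    = ((List.range (2 ^ j)).filter (fun a => pvGoodB D j a)).map (fun a : Nat => (a : Int)) := by
  induction j with
  | zero => simp [pvGoodB]
  | succ j ih =>
    have hj' : j ≤ D.length := by omega
    have hlen : j < D.zipIdx.length := by rw [List.length_zipIdx]; omega
    rw [List.take_succ_eq_append_getElem hlen, List.foldl_append, ih hj', List.getElem_zipIdx]
    simp only [List.foldl_cons, List.foldl_nil, Nat.zero_add]
    have hD : D.getD j 0 = D[j]'(by omega) := List.getD_eq_getElem D 0 (by omega)
    set l1 := (List.range (2 ^ j)).filter (fun a => pvGoodB D j a) with hl1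
    have hmem : ∀ m ∈ l1, m < 2 ^ j := by
      intro m hm
      have := List.mem_filter.mp hm
      exact List.mem_range.mp this.1
    have lhs2 :
        (((l1.map (fun a : Nat => (a : Int))).filter
            (fun m => PySem.Int.band m (pvReq D (D[j]'(by omega)) j) == pvReq D (D[j]'(by omega)) j)).map
          (fun m => PySem.Int.bor m ((1 : Int) <<< j)))
        = ((l1.filter (fun m => (List.range j).all
              (fun k => !(decide (D.getD k 0 ∣ D.getD j 0)) || m.testBit k))).map
            (fun m => ((2 ^ j + m : Nat) : Int))) := by
      rw [List.filter_map, List.map_map]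
      simp only [Function.comp_def, pv_band_req, hD]
      apply List.map_congr_left
      intro m hm
      have hmlt : m < 2 ^ j := hmem m (List.mem_of_mem_filter hm)
      simp only [pv_shiftLeft_one, PySem.Int.bor_natCast, pv_or_low hmlt]
    rw [lhs2]
    have hsplit : (2 : Nat) ^ (j + 1) = 2 ^ j + 2 ^ j := by rw [pow_succ]; omega
    rw [hsplit, List.range_add, List.filter_append, List.map_append]
    congr 1
    · rw [hl1]
      exact congrArg _ (List.filter_congr
        (fun a ha => (pvGoodB_low D j (List.mem_range.mp ha)).symm))
    · rw [List.filter_map, List.map_map]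
      have e1 : List.filter ((fun a => pvGoodB D (j + 1) a) ∘ (fun x => 2 ^ j + x)) (List.range (2 ^ j))
          = List.filter (fun m => pvGoodB D j m && (List.range j).all
              (fun k => !(decide (D.getD k 0 ∣ D.getD j 0)) || m.testBit k)) (List.range (2 ^ j)) :=
        List.filter_congr (fun m hm => pvGoodB_high D j (List.mem_range.mp hm))
      have e2 : List.filter (fun m => (List.range j).all
              (fun k => !(decide (D.getD k 0 ∣ D.getD j 0)) || m.testBit k)) l1
          = List.filter (fun m => pvGoodB D j m && (List.range j).all
              (fun k => !(decide (D.getD k 0 ∣ D.getD j 0)) || m.testBit k)) (List.range (2 ^ j)) := by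
        rw [hl1, List.filter_filter]
        exact List.filter_congr (fun m _ => Bool.and_comm _ _)
      rw [e1, e2]
      exact List.map_congr_left (fun a _ => rfl)

lemma pv_sieve_iff_good (n : Int) (a : Nat) :
    pvSieve (pvBuild (pvDivisors n) (a : Int)) = pvGoodB (pvDivisors n) (pvDivisors n).length a := by
  set D := pvDivisors n with hDdef
  have hget : ∀ (i : Nat) (h : i < D.length), D.getD i 0 = D[i]'h :=
    fun i h => List.getD_eq_getElem D 0 h
  have hmono : ∀ (k t : Nat) (hk : k < D.length) (ht : t < D.length), k < t →
      D[k]'hk < D[t]'ht := fun k t hk ht hlt =>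
    List.pairwise_iff_getElem.mp (pairwise_pvDivisors n) k t hk ht hlt
  apply pv_bool_eq_of_iff
  simp only [pvSieve, pvGoodB, List.all_eq_true, List.mem_range, PySem.List.mem_pyRange_one,
    Bool.or_eq_true, Bool.not_eq_true', decide_eq_false_iff_not, Bool.and_eq_false_iff,
    beq_eq_false_iff_ne, ne_eq, Bool.not_eq_false', List.contains_iff_mem,
    PySem.Int.mod_eq_zero_iff_dvd]
  constructor
  · intro h t ht
    by_cases hbt : a.testBit t
    case neg => exact Or.inl (by simpa using hbt)
    refine Or.inr (fun k hk => ?_)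
    by_cases hdvd : D.getD k 0 ∣ D.getD t 0
    case neg => exact Or.inl hdvd
    refine Or.inr ?_
    have hd : D.getD t 0 ∈ pvBuild D (a : Int) :=
      pv_mem_build.mpr ⟨t, ht, hbt, rfl⟩
    have hkL : k < D.length := by omega
    have h1 : (1 : Int) ≤ D.getD k 0 := by
      rw [hget k hkL]
      exact (mem_pvDivisors.mp (List.getElem_mem hkL)).1
    have hlt : D.getD k 0 < D.getD t 0 := by
      rw [hget k hkL, hget t ht]; exact hmono k t hkL ht hk
    rcases h _ hd (D.getD k 0) ⟨h1, hlt⟩ with hmod | hmem'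
    · exact absurd hdvd hmod
    · obtain ⟨k', hk', hb', he⟩ := pv_mem_build.mp hmem'
      have hkk : k' = k := by
        by_contra hne
        rcases Nat.lt_or_ge k' k with hlt' | hge
        · have := hmono k' k hk' hkL hlt'
          rw [← hget k' hk', ← hget k hkL, he] at this
          omega
        · have hlt' : k < k' := by omega
          have := hmono k k' hkL hk' hlt'
          rw [← hget k' hk', ← hget k hkL, he] at this
          omega
      exact hkk ▸ hb'
  · intro h d hd d' hcond
    obtain ⟨t, ht, hbt, rfl⟩ := pv_mem_build.mp hd
    obtain ⟨h1, hlt⟩ := hcond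
    by_cases hdvd : d' ∣ D.getD t 0
    case neg => exact Or.inl hdvd
    refine Or.inr ?_
    have hDt : D.getD t 0 ∈ D := by rw [hget t ht]; exact List.getElem_mem ht
    have hDtm := mem_pvDivisors.mp (hDdef ▸ hDt)
    have hd'n : d' ∣ n := dvd_trans hdvd hDtm.2.2
    have hd'le : d' ≤ n := le_trans (le_of_lt hlt) hDtm.2.1
    have hd'D : d' ∈ D := hDdef ▸ mem_pvDivisors.mpr ⟨h1, hd'le, hd'n⟩
    obtain ⟨k, hkL, he⟩ := List.getElem_of_mem hd'D
    have hkt : k < t := by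
      by_contra hge
      rcases Nat.eq_or_lt_of_le (Nat.le_of_not_lt hge) with heq | hlt'
      · subst heq
        rw [hget t ht, he] at hlt
        exact absurd hlt (lt_irrefl d')
      · have := hmono t k ht hkL hlt'
        rw [he, ← hget t ht] at this
        omega
    rcases h t ht with hbf | hall
    · rw [hbt] at hbf; cases hbf
    rcases hall k hkt with hnd | hb
    · rw [hget k (by omega), he] at hnd
      exact absurd hdvd hnd
    · exact pv_mem_build.mpr ⟨k, by omega, hb, by rw [hget k (by omega)]; exact he⟩

-- ===== VERDICT (by name: the statement is the Claim_ definition above) =====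
theorem count_sieves_spec : Claim_equal_count_sieves := by
  intro n _
  show count_sieves n = count_sieves_alt n
  have hA : count_sieves n
      = ((PySem.List.pyRange 0 ((2 : Int) ^ (pvDivisors n).length) 1).filter
          (fun i => pvSieve (pvBuild (pvDivisors n) i))).map (fun i => pvBuild (pvDivisors n) i) := by
    show (PySem.List.pyRange 0 ((2 : Int) ^ (pvDivisors n).length) 1).foldl
      (fun sieves i =>
        if pvSieve (pvBuild (pvDivisors n) i)
        then sieves ++ [pvBuild (pvDivisors n) i] else sieves) [] = _
    rw [PySem.List.foldl_append_if (fun i => pvSieve (pvBuild (pvDivisors n) i))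
      (fun i => pvBuild (pvDivisors n) i) _ [], List.nil_append]
  have hB : count_sieves_alt n
      = (((pvDivisors n).zipIdx.take (pvDivisors n).length).foldl
          (fun ideals dj =>
            let req := pvReq (pvDivisors n) dj.1 dj.2
            ideals ++ (ideals.filter (fun m => PySem.Int.band m req == req)).map
              (fun m => PySem.Int.bor m ((1 : Int) <<< dj.2)))
          [0]).map (fun m => pvBuild (pvDivisors n) m) := by
    have ht : (pvDivisors n).zipIdx.take (pvDivisors n).length = (pvDivisors n).zipIdx := by
      rw [← List.length_zipIdx (i := 0)]
      exact List.take_length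
    rw [ht]
    rfl
  rw [hA, hB, pv_ideals_eq (pvDivisors n) (pvDivisors n).length le_rfl,
    show ((2 : Int) ^ (pvDivisors n).length) = ((2 ^ (pvDivisors n).length : Nat) : Int)
      by push_cast; ring,
    PySem.List.pyRange_zero_natCast, List.filter_map, List.map_map, List.map_map]
  rw [List.filter_congr (fun a ha => by
    show pvSieve (pvBuild (pvDivisors n) ((a : Nat) : Int)) = pvGoodB (pvDivisors n) (pvDivisors n).length a
    exact pv_sieve_iff_good n a)]
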